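-- pv_equiv track=rewrite | github.com/SingSongZepe/Nleetcode | lc2639_py/main.py | count_len
-- ===== SOURCE A (Python) =====
-- def count_len(v: int) -> int:
--     if v == 0:
--         return 1
--
--     l = 0 if v > 0 else 1
--     v = abs(v)
--     while v:
--         l += 1
--         v //= 10
--
--     return l
-- ===== SOURCE B (Python) =====
-- def count_len(v: int) -> int:
--     return len(str(int(v)))
-- ===== Notes on version B (the rewrite author's own statement) =====
-- stated objective: idiomatic
-- what changed: Replaces the manual sign/absolute-value bookkeeping and the digit-counting division loop by the length of the decimal string representation, len(str(int(v))).
import Mathlib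
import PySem

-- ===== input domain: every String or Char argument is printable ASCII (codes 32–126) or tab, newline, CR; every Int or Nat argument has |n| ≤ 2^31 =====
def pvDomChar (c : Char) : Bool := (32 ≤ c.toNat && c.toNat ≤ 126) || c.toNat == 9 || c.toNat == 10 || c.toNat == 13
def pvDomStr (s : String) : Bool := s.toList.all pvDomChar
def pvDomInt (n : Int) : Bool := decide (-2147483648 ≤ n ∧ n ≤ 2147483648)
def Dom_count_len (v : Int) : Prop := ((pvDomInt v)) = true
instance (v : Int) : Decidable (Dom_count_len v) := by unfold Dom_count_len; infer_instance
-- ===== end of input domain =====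

-- B replaces A's sign bookkeeping and division loop by the length of str(v); same values, no speed claim.

-- ===== PORT A =====
-- the while loop: after v = abs(v) the loop variable is a natural number, so the
-- loop is ported as recursion on a Nat, dividing by 10 (Python // on nonnegatives = Nat /)
def count_len_loop (l : Int) (v : Nat) : Int :=
  if v = 0 then l else count_len_loop (l + 1) (v / 10)
  decreasing_by exact Nat.div_lt_self (Nat.pos_of_ne_zero (by assumption)) (by norm_num)

def count_len (v : Int) : Int :=
  if v = 0 then 1
  else
    let l : Int := if v > 0 then 0 else 1
    count_len_loop l v.natAbs

-- ===== PORT B =====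
def count_len_alt (v : Int) : Int := PySem.Str.len (PySem.Int.toStr v)

-- ===== PRECONDITION & SPEC =====
def Spec_count_len (v : Int) (out : Int) : Prop := out = count_len_alt v
instance (v : Int) (out : Int) : Decidable (Spec_count_len v out) := by unfold Spec_count_len; infer_instance

-- ===== CLAIM (what is proved, stated in full; the proofs are below) =====
def Claim_equal_count_len : Prop := ∀ (v : Int), Dom_count_len v → Spec_count_len v (count_len v)

-- ===== LEMMAS AND PROOFS =====

-- number of decimal digits of n (0 for 0), the value A's loop adds to its accumulator
def numDigits10 (n : Nat) : Nat :=
  if n = 0 then 0 else numDigits10 (n / 10) + 1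
  decreasing_by exact Nat.div_lt_self (Nat.pos_of_ne_zero (by assumption)) (by norm_num)

lemma count_len_loop_eq (n : Nat) : ∀ l : Int, count_len_loop l n = l + numDigits10 n := by
  induction n using Nat.strong_induction_on with
  | _ n ih =>
    intro l
    rw [count_len_loop, numDigits10]
    by_cases h : n = 0
    · simp [h]
    · rw [if_neg h, if_neg h,
        ih (n / 10) (Nat.div_lt_self (Nat.pos_of_ne_zero h) (by norm_num))]
      push_cast; ring

lemma toDigitsCore_len (f : Nat) : ∀ n : Nat, n < f →
    (Nat.toDigitsCore 10 f n []).length = max 1 (numDigits10 n) := by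
  induction f with
  | zero => intro n h; omega
  | succ f ih =>
    intro n hn
    rw [Nat.toDigitsCore]
    by_cases h0 : n / 10 = 0
    · rw [if_pos h0]
      rw [numDigits10]
      by_cases h : n = 0
      · simp [h]
      · rw [if_neg h, numDigits10, if_pos h0]
        simp
    · rw [if_neg h0, Nat.toDigitsCore_lens_eq]
      have hn0 : n ≠ 0 := by intro h; simp [h] at h0
      have hlt : n / 10 < n := Nat.div_lt_self (Nat.pos_of_ne_zero hn0) (by norm_num)
      rw [ih (n / 10) (by omega)]
      rw [show numDigits10 n = numDigits10 (n / 10) + 1 from by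
        rw [numDigits10, if_neg hn0]]
      have : numDigits10 (n / 10) ≠ 0 := by
        rw [numDigits10, if_neg h0]; omega
      omega

lemma toDigits_len (n : Nat) : (Nat.toDigits 10 n).length = max 1 (numDigits10 n) :=
  toDigitsCore_len (n + 1) n (Nat.lt_succ_self n)

-- ===== VERDICT (by name: the statement is the Claim_ definition above) =====
theorem count_len_spec : Claim_equal_count_len := by
  intro v _
  unfold Spec_count_len count_len count_len_alt
  rw [PySem.Str.len, PySem.Int.toList_toStr, PySem.Int.toChars]
  by_cases h0 : v = 0
  · simp [h0, Nat.toDigits]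
    rw [Nat.toDigitsCore]
    simp
  · rw [if_neg h0]
    by_cases hp : v > 0
    · rw [if_pos hp, if_neg (by omega : ¬ v < 0)]
      rw [count_len_loop_eq]
      have : v.toNat = v.natAbs := by omega
      rw [this, toDigits_len]
      have hnz : v.natAbs ≠ 0 := by omega
      have : numDigits10 v.natAbs ≠ 0 := by rw [numDigits10, if_neg hnz]; omega
      simp; omega
    · rw [if_neg hp, if_pos (by omega : v < 0)]
      rw [count_len_loop_eq]
      have hnz : v.natAbs ≠ 0 := by omega
      have : numDigits10 v.natAbs ≠ 0 := by rw [numDigits10, if_neg hnz]; omega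
      simp [toDigits_len]; omega
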